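-- pv_equiv track=rewrite | github.com/oikeuchi/jomfft | misc/script/primefactor.py | output_indices
-- ===== SOURCE A (Python) =====
-- def product(factors):
--     out = 1
--     for f in factors:
--         out *= f
--     return out
--
-- def recursively_append_indices(n, sizes, scales, i, v, out):
--     if i < 0:
--         out.append(v % n)
--     else:
--         for j in range(sizes[i]):
--             recursively_append_indices(n, sizes, scales, i - 1,
--                                   v + scales[i] * j, out)
--
-- def output_indices(factors):
--     n = product(factors)
--     g = []
--     for f in factors:
--         g.append(n //f)
--     out = []
--     for j in range(factors[-1]):
--         recursively_append_indices(n, factors, g, len(factors) - 2,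
--                                g[-1] * j, out)
--     return out
-- ===== SOURCE B (Python) =====
-- import itertools
--
-- def output_indices(factors):
--     n = 1
--     for f in factors:
--         n *= f
--     g = [n // f for f in factors]
--     if any(f <= 0 for f in factors):
--         return []  # some index range is empty: there are no combinations
--     combos = itertools.product(*[range(s) for s in reversed(factors)])
--     return [sum(gi * j for gi, j in zip(reversed(g), combo)) % n for combo in combos]
-- ===== Notes on version B (the rewrite author's own statement) =====
-- stated objective: alternative
-- what changed: Replaces A's recursive descent over factor indices (with an appended-to accumulator list) by an iterative enumeration of index tuples via itertools.product over reversed ranges, computing each result as a zip dot product mod n.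
import Mathlib
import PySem

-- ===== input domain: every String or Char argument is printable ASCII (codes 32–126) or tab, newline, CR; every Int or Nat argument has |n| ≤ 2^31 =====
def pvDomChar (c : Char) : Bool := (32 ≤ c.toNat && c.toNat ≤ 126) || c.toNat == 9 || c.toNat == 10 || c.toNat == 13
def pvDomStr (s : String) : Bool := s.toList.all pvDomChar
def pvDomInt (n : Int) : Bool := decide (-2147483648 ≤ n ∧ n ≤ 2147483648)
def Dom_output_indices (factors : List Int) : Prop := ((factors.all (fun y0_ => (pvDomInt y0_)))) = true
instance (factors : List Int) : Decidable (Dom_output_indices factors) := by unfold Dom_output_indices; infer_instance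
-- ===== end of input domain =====

-- B replaces A's recursive descent over factor indices by an iterative cartesian-product
-- enumeration of index tuples with a zip dot product (alternative decomposition, same cost).


-- ===== PORT A =====
-- sizes[i]/scales[i] ported as pyGetD with default 0: Python would raise IndexError out of
-- range, but every call here has the index in range (Pre_ excludes the raising inputs).
def recursively_append_indices (n : Int) (sizes scales : List Int) (i : Int) (v : Int)
    (out : List Int) : List Int :=
  if i < 0 then out ++ [PySem.Int.mod v n]
  else
    (PySem.List.pyRange 0 (PySem.List.pyGetD sizes i 0) 1).foldl
      (fun acc j =>
        recursively_append_indices n sizes scales (i - 1)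
          (v + PySem.List.pyGetD scales i 0 * j) acc) out
termination_by (i + 1).toNat
decreasing_by omega

def output_indices (factors : List Int) : List Int :=
  let n := factors.foldl (fun out f => out * f) 1
  let g := factors.foldl (fun g f => g ++ [PySem.Int.floordiv n f]) ([] : List Int)
  (PySem.List.pyRange 0 (PySem.List.pyGetD factors (-1) 0) 1).foldl
    (fun out j =>
      recursively_append_indices n factors g ((factors.length : Int) - 2)
        (PySem.List.pyGetD g (-1) 0 * j) out) []

-- ===== PORT B =====
-- itertools.product ported by hand as the standard foldr cartesian product
-- (exact: the first component varies slowest, as in CPython).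
def pyProduct (rs : List (List Int)) : List (List Int) :=
  rs.foldr (fun r acc => r.flatMap (fun x => acc.map (fun t => x :: t))) [[]]

def output_indices_alt (factors : List Int) : List Int :=
  let n := factors.foldl (fun out f => out * f) 1
  let g := factors.map (fun f => PySem.Int.floordiv n f)
  if factors.any (fun f => decide (f ≤ 0)) then []
  else
    (pyProduct (factors.reverse.map (fun s => PySem.List.pyRange 0 s 1))).map
      (fun combo =>
        PySem.Int.mod (List.zipWith (fun gi j => gi * j) g.reverse combo).sum n)

-- ===== PRECONDITION & SPEC =====
-- Pre_ excludes exactly the inputs where A raises: empty factors (IndexError on factors[-1])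
-- and any zero factor (ZeroDivisionError in n // f).
def Pre_output_indices (factors : List Int) : Prop :=
  factors ≠ [] ∧ (0 : Int) ∉ factors
instance (factors : List Int) : Decidable (Pre_output_indices factors) := by
  unfold Pre_output_indices; infer_instance

def pvWitness_output_indices : List Int := [2, 3]

def Spec_output_indices (factors : List Int) (out : List Int) : Prop :=
  out = output_indices_alt factors
instance (factors : List Int) (out : List Int) : Decidable (Spec_output_indices factors out) := by
  unfold Spec_output_indices; infer_instance

-- ===== CLAIM (what is proved, stated in full; the proofs are below) =====
def Claim_equal_output_indices : Prop :=
  ∀ (factors : List Int), Dom_output_indices factors → Pre_output_indices factors →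
    Spec_output_indices factors (output_indices factors)

-- ===== LEMMAS AND PROOFS =====

-- All index combinations for factor positions k-1 … 0, in A's emission order
-- (position k-1 outermost, position 0 fastest varying).
def combosA (sizes : List Int) : Nat → List (List Int)
  | 0 => [[]]
  | k + 1 =>
    (PySem.List.pyRange 0 (sizes.getD k 0) 1).flatMap
      (fun j => (combosA sizes k).map (fun c => j :: c))

-- dot product of such a combo with scales[k-1] … scales[0]
def dotA (scales : List Int) : Nat → List Int → Int
  | _, [] => 0
  | 0, _ :: _ => 0
  | k + 1, j :: c => scales.getD k 0 * j + dotA scales k c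

theorem rec_eq (n : Int) (sizes scales : List Int) (k : Nat) (v : Int) (out : List Int) :
    recursively_append_indices n sizes scales ((k : Int) - 1) v out
      = out ++ (combosA sizes k).map (fun c => PySem.Int.mod (v + dotA scales k c) n) := by
  induction k generalizing v out with
  | zero => simp [recursively_append_indices, combosA, dotA]
  | succ k ih =>
    have hidx : (((k + 1 : Nat) : Int) - 1) = ((k : Nat) : Int) := by push_cast; omega
    rw [hidx, recursively_append_indices, if_neg (by omega : ¬ ((k : Int) < 0))]
    have hf : (fun (acc : List Int) (j : Int) =>
        recursively_append_indices n sizes scales (((k : Nat) : Int) - 1)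
          (v + PySem.List.pyGetD scales ((k : Nat) : Int) 0 * j) acc)
        = fun acc j => acc ++ (combosA sizes k).map
            (fun c => PySem.Int.mod ((v + scales.getD k 0 * j) + dotA scales k c) n) := by
      funext acc j
      rw [ih]
      simp
    rw [hf, PySem.List.foldl_append_eq_flatMap]
    congr 1
    rw [combosA]
    simp only [PySem.List.pyGetD_natCast, List.map_flatMap, List.map_map]
    refine List.flatMap_congr (fun j _ => ?_)
    refine List.map_congr_left (fun c _ => ?_)
    simp only [Function.comp_apply, dotA]
    congr 1
    ring

theorem combosA_congr (s1 s2 : List Int) (k : Nat)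
    (h : ∀ i < k, s1.getD i 0 = s2.getD i 0) : combosA s1 k = combosA s2 k := by
  induction k with
  | zero => rfl
  | succ k ih =>
    rw [combosA, combosA, h k (by omega), ih (fun i hi => h i (by omega))]

theorem pyProduct_eq_combosA (sizes : List Int) :
    pyProduct (sizes.reverse.map (fun s => PySem.List.pyRange 0 s 1))
      = combosA sizes sizes.length := by
  induction sizes using List.reverseRecOn with
  | nil => rfl
  | append_singleton ys s ih =>
    have hrev : (ys ++ [s]).reverse = s :: ys.reverse := by simp
    have hlen : (ys ++ [s]).length = ys.length + 1 := by simp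
    rw [hrev, hlen]
    simp only [List.map_cons]
    have hstep : pyProduct (PySem.List.pyRange 0 s 1 :: ys.reverse.map (fun s => PySem.List.pyRange 0 s 1))
        = (PySem.List.pyRange 0 s 1).flatMap
            (fun x => (pyProduct (ys.reverse.map (fun s => PySem.List.pyRange 0 s 1))).map (fun t => x :: t)) := rfl
    rw [hstep, ih, combosA]
    have hget : (ys ++ [s]).getD ys.length 0 = s := by
      rw [List.getD_eq_getElem _ 0 (by simp)]
      simp
    rw [hget]
    rw [combosA_congr (ys ++ [s]) ys ys.length
      (fun i hi => by rw [List.getD_append _ _ _ _ hi])]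

theorem combosA_eq_nil (sizes : List Int) (k : Nat) (i : Nat) (hik : i < k)
    (hi : sizes.getD i 0 ≤ 0) : combosA sizes k = [] := by
  induction k with
  | zero => omega
  | succ k ih =>
    rw [combosA]
    rcases Nat.lt_or_ge i k with hlt | hge
    · rw [ih hlt]
      simp
    · have : i = k := by omega
      subst this
      rw [PySem.List.pyRange_one_eq_nil (by omega)]
      rfl

theorem combosA_length (sizes : List Int) (k : Nat) (c : List Int)
    (hc : c ∈ combosA sizes k) : c.length = k := by
  induction k generalizing c with
  | zero => simp [combosA] at hc; simp [hc]
  | succ k ih =>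
    rw [combosA] at hc
    simp only [List.mem_flatMap, List.mem_map] at hc
    obtain ⟨j, -, c', hc', rfl⟩ := hc
    simp [ih c' hc']

theorem zipWith_sum_eq_dotA (scales : List Int) (k : Nat) (hk : k ≤ scales.length)
    (c : List Int) (hc : c.length = k) :
    (List.zipWith (fun gi j => gi * j) (scales.take k).reverse c).sum = dotA scales k c := by
  induction k generalizing c with
  | zero =>
    have : c = [] := List.eq_nil_of_length_eq_zero hc
    simp [this, dotA]
  | succ k ih =>
    match c with
    | j :: c' =>
      have hk' : k < scales.length := by omega
      have htake : scales.take (k + 1) = scales.take k ++ [scales[k]] := by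
        rw [List.take_add_one]
        simp [List.getElem?_eq_getElem hk']
      rw [htake, List.reverse_append]
      simp only [List.reverse_singleton, List.singleton_append, List.zipWith_cons_cons,
        List.sum_cons]
      rw [ih (by omega) c' (by simpa using hc)]
      rw [dotA]
      congr 1
      rw [List.getD_eq_getElem scales 0 hk']

theorem output_indices_eq_combos (factors : List Int) (h : factors ≠ []) :
    output_indices factors
      = (combosA factors factors.length).map
          (fun c => PySem.Int.mod
            (dotA (factors.map (fun f =>
              PySem.Int.floordiv (factors.foldl (fun out f => out * f) 1) f))
              factors.length c)
            (factors.foldl (fun out f => out * f) 1)) := by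
  rcases List.eq_nil_or_concat' factors with rfl | ⟨ys, s, rfl⟩
  · exact absurd rfl h
  simp only [output_indices]
  rw [PySem.List.foldl_append_singleton_eq_map]
  rw [PySem.List.pyGetD_neg_one_append_singleton]
  have hmap : (ys ++ [s]).map (fun f => PySem.Int.floordiv ((ys ++ [s]).foldl (fun out f => out * f) 1) f)
      = ys.map (fun f => PySem.Int.floordiv ((ys ++ [s]).foldl (fun out f => out * f) 1) f)
        ++ [PySem.Int.floordiv ((ys ++ [s]).foldl (fun out f => out * f) 1) s] := by
    simp
  rw [List.nil_append, hmap, PySem.List.pyGetD_neg_one_append_singleton]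
  have hidx2 : (((ys ++ [s]).length : Int) - 2) = ((ys.length : Nat) : Int) - 1 := by
    simp; omega
  rw [hidx2]
  have hf : (fun (out : List Int) (j : Int) =>
      recursively_append_indices ((ys ++ [s]).foldl (fun out f => out * f) 1) (ys ++ [s])
        (ys.map (fun f => PySem.Int.floordiv ((ys ++ [s]).foldl (fun out f => out * f) 1) f)
          ++ [PySem.Int.floordiv ((ys ++ [s]).foldl (fun out f => out * f) 1) s])
        (((ys.length : Nat) : Int) - 1)
        (PySem.Int.floordiv ((ys ++ [s]).foldl (fun out f => out * f) 1) s * j) out)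
      = fun out j => out ++ (combosA (ys ++ [s]) ys.length).map
          (fun c => PySem.Int.mod
            (PySem.Int.floordiv ((ys ++ [s]).foldl (fun out f => out * f) 1) s * j
              + dotA (ys.map (fun f => PySem.Int.floordiv ((ys ++ [s]).foldl (fun out f => out * f) 1) f)
                  ++ [PySem.Int.floordiv ((ys ++ [s]).foldl (fun out f => out * f) 1) s]) ys.length c)
            ((ys ++ [s]).foldl (fun out f => out * f) 1)) := by
    funext out j
    rw [rec_eq]
  rw [hf, PySem.List.foldl_append_eq_flatMap, List.nil_append]
  have hlen : (ys ++ [s]).length = ys.length + 1 := by simp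
  rw [hlen, ← hmap, combosA]
  have hget : (ys ++ [s]).getD ys.length 0 = s := by
    rw [List.getD_eq_getElem _ 0 (by simp)]
    simp
  rw [hget]
  simp only [List.map_flatMap, List.map_map]
  refine List.flatMap_congr (fun j _ => ?_)
  refine List.map_congr_left (fun c _ => ?_)
  simp only [Function.comp_apply, dotA]
  have hg : ((ys ++ [s]).map (fun f =>
        PySem.Int.floordiv ((ys ++ [s]).foldl (fun out f => out * f) 1) f)).getD ys.length 0
      = PySem.Int.floordiv ((ys ++ [s]).foldl (fun out f => out * f) 1) s := by
    rw [hmap, List.getD_eq_getElem _ 0 (by simp)]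
    simp
  rw [hg]

-- ===== VERDICT (by name: the statement is the Claim_ definition above) =====
theorem output_indices_spec : Claim_equal_output_indices := by
  intro factors _ hpre
  unfold Spec_output_indices
  rw [output_indices_eq_combos factors hpre.1]
  simp only [output_indices_alt]
  by_cases hneg : factors.any (fun f => decide (f ≤ 0)) = true
  · rw [if_pos hneg]
    obtain ⟨f, hf, hle⟩ := List.any_eq_true.mp hneg
    obtain ⟨i, hi, rfl⟩ := List.mem_iff_getElem.mp hf
    rw [combosA_eq_nil factors factors.length i hi
      (by rw [List.getD_eq_getElem _ 0 hi]; exact of_decide_eq_true hle)]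
    rfl
  rw [if_neg hneg, pyProduct_eq_combosA]
  refine (List.map_congr_left (fun c hc => ?_)).symm
  have hclen : c.length = factors.length := combosA_length factors factors.length c hc
  have hglen : (factors.map (fun f =>
      PySem.Int.floordiv (factors.foldl (fun out f => out * f) 1) f)).length = factors.length := by
    simp
  congr 1
  rw [← zipWith_sum_eq_dotA _ factors.length (by omega) c hclen]
  rw [show (factors.map (fun f => PySem.Int.floordiv (factors.foldl (fun out f => out * f) 1) f)).take factors.length
      = factors.map (fun f => PySem.Int.floordiv (factors.foldl (fun out f => out * f) 1) f) from by
    rw [← hglen, List.take_length]]
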